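-- pv_equiv track=rewrite | github.com/fowled/NSI-ECE-2024 | 38.py | indices_maxi
-- ===== SOURCE A (Python) =====
-- def indices_maxi(tab: list):
--     maxi = tab[0]
--     indices = []
--
--     for i in range(len(tab)):
--         if tab[i] > maxi:
--             maxi = tab[i]
--             indices = [i]
--         elif tab[i] == maxi:
--             indices.append(i)
--
--     return maxi, indices
-- ===== SOURCE B (Python) =====
-- def indices_maxi(tab: list):
--     maxi = max(tab)
--     return maxi, [i for i, v in enumerate(tab) if v == maxi]
-- ===== Notes on version B (the rewrite author's own statement) =====
-- stated objective: simpler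
-- what changed: Replaces A's single interleaved scan with reset/append branches by a two-pass decomposition: compute max(tab) first, then collect the matching indices with one comprehension over enumerate.
import Mathlib
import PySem

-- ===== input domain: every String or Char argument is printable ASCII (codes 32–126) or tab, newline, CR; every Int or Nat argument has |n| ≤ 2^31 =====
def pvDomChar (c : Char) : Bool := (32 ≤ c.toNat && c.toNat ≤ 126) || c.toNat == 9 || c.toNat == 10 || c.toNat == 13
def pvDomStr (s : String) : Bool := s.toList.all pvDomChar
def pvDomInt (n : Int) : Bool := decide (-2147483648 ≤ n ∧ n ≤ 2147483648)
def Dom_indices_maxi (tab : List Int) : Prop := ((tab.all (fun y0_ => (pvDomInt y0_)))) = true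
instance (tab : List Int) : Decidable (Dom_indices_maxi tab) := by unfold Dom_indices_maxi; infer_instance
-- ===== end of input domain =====

-- B replaces A's single interleaved scan (reset/append branches) by a two-pass
-- decomposition: max first, then one filter over enumerate; objective: simpler.

-- ===== PORT A =====
-- loop body of A's for-loop (same branches, same order)
def stepA (st : Int × List Int) (p : Int × Int) : Int × List Int :=
  if p.2 > st.1 then (p.2, [p.1])
  else if p.2 = st.1 then (st.1, st.2 ++ [p.1])
  else st

def indices_maxi (tab : List Int) : Int × List Int :=
  let maxi := PySem.List.pyGetD tab 0 0   -- tab[0]; IndexError on [] excluded by Pre_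
  (PySem.List.pyRange 0 tab.length 1).foldl
    (fun st i => stepA st (i, PySem.List.pyGetD tab i 0)) (maxi, [])

-- ===== PORT B =====
def indices_maxi_alt (tab : List Int) : Int × List Int :=
  let maxi := (PySem.List.max? tab (fun y => y)).getD 0   -- max(tab); ValueError on [] excluded by Pre_
  (maxi, ((PySem.List.enumerate tab 0).filter (fun p => p.2 == maxi)).map (·.1))

-- ===== PRECONDITION & SPEC =====
-- Pre_ excludes only the empty list, where Python A raises IndexError (tab[0]); B raises ValueError there.
def Pre_indices_maxi (tab : List Int) : Prop := tab ≠ []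
instance (tab : List Int) : Decidable (Pre_indices_maxi tab) := by unfold Pre_indices_maxi; infer_instance
def pvWitness_indices_maxi : List Int := [3, 1, 3]

def Spec_indices_maxi (tab : List Int) (out : Int × List Int) : Prop := out = indices_maxi_alt tab
instance (tab : List Int) (out : Int × List Int) : Decidable (Spec_indices_maxi tab out) := by unfold Spec_indices_maxi; infer_instance

-- ===== CLAIM (what is proved, stated in full; the proofs are below) =====
def Claim_equal_indices_maxi : Prop := ∀ (tab : List Int), Dom_indices_maxi tab → Pre_indices_maxi tab → Spec_indices_maxi tab (indices_maxi tab)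

-- ===== LEMMAS AND PROOFS =====

-- running max of the values of an enumerated list
def runMax (l : List (Int × Int)) (m : Int) : Int := l.foldl (fun a p => max a p.2) m

lemma le_runMax (l : List (Int × Int)) (m : Int) : m ≤ runMax l m := by
  exact (PySem.List.le_foldl_max_int l (fun p => p.2) m).1

-- invariant of A's loop: the state is (running max, pending indices);
-- the pending indices are kept iff the running max never strictly improves.
lemma foldl_stepA (l : List (Int × Int)) (m : Int) (acc : List Int) :
    l.foldl stepA (m, acc)
      = (runMax l m,
         (if m = runMax l m then acc else [])
           ++ (l.filter (fun p => p.2 == runMax l m)).map (·.1)) := by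
  induction l generalizing m acc with
  | nil => simp [runMax]
  | cons p t ih =>
    rcases p with ⟨i, v⟩
    have hrm : runMax ((i, v) :: t) m = runMax t (max m v) := rfl
    by_cases h1 : v > m
    · have hstep : stepA (m, acc) (i, v) = (v, [i]) := by simp [stepA, h1]
      have hmv : max m v = v := by omega
      have hle : v ≤ runMax t v := le_runMax t v
      have hne : m ≠ runMax ((i, v) :: t) m := by
        rw [hrm, hmv]; omega
      simp only [List.foldl_cons, hstep, ih, hrm, hmv]
      by_cases h2 : v = runMax t v
      · simp only [← h2]
        simp
        intro hmm; omega
      · simp only [if_neg h2]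
        have hvb : ((v : Int) == runMax t v) = false := by simpa using h2
        simp [hvb]
        intro hmm; omega
    · have hmv : max m v = m := by omega
      by_cases h2 : v = m
      · have hstep : stepA (m, acc) (i, v) = (m, acc ++ [i]) := by
          simp [stepA, h2]
        simp only [List.foldl_cons, hstep, ih, hrm, hmv]
        by_cases h3 : m = runMax t m
        · have hv : ((v : Int) == runMax t m) = true := by
            simpa using h2.trans h3
          simp [if_pos h3, hv]
        · have hv : ((v : Int) == runMax t m) = false := by
            simp; omega
          simp [if_neg h3, hv]
      · have hstep : stepA (m, acc) (i, v) = (m, acc) := by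
          simp only [stepA]
          rw [if_neg h1, if_neg h2]
        simp only [List.foldl_cons, hstep, ih, hrm, hmv]
        have hlt : v < m := by omega
        have hv : ((v : Int) == runMax t m) = false := by
          have := le_runMax t m; simp; omega
        simp [hv]

-- A's fold over range(len(tab)) is the fold of stepA over enumerate tab 0
lemma indices_maxi_eq_foldl (tab : List Int) :
    indices_maxi tab
      = (PySem.List.enumerate tab 0).foldl stepA (PySem.List.pyGetD tab 0 0, []) := by
  rw [indices_maxi, PySem.List.enumerate_eq_map_pyRange (d := 0), List.foldl_map]
  simp

-- the running max over enumerate (h :: t) 0 starting at h is Python's max(h :: t)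
lemma runMax_enumerate (h : Int) (t : List Int) :
    runMax (PySem.List.enumerate (h :: t) 0) h = t.foldl max h := by
  have : ∀ (s : Int) (l : List Int) (a : Int),
      runMax (PySem.List.enumerate l s) a = l.foldl max a := by
    intro s l
    induction l generalizing s with
    | nil => intro a; rfl
    | cons x xs ih => intro a; simp [PySem.List.enumerate_cons, runMax, List.foldl_cons] at *
                      exact ih (s + 1) (max a x)
  rw [this]
  simp

-- ===== VERDICT (by name: the statement is the Claim_ definition above) =====
theorem indices_maxi_spec : Claim_equal_indices_maxi := by
  intro tab _ hpre
  unfold Spec_indices_maxi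
  match tab with
  | [] => exact absurd rfl hpre
  | h :: t =>
    rw [indices_maxi_eq_foldl]
    have h0 : PySem.List.pyGetD (h :: t) 0 0 = h := PySem.List.pyGetD_zero_cons h t 0
    rw [h0, foldl_stepA, runMax_enumerate]
    rw [indices_maxi_alt]
    simp [PySem.List.max?_id_cons]
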